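-- pv_equiv track=rewrite | github.com/sdpython/pyquickhelper | src/pyquickhelper/pycode/py3to2.py | py3to2_remove_raise_from
-- ===== SOURCE A (Python) =====
-- def py3to2_remove_raise_from(content):
--     """
--     Removes expression such as: ``raise Exception ("...") from e``.
--     The function is very basic. It should be done with a grammar.
--
--     @param      content     file content
--     @return                 script
--     """
--     lines = content.split("\n")
--     r = None
--     for i, line in enumerate(lines):
--         if " raise " in line:
--             r = i
--         if " from " in line and r is not None:
--             spl = line.split(" from ")
--             if len(spl[0].strip(" \n")) > 0:
--                 lines[i] = line = spl[0] + "# from " + " - ".join(spl[1:])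
--
--         if r is not None and i > r + 3:
--             r = None
--
--     return "\n".join(lines)
-- ===== SOURCE B (Python) =====
-- def py3to2_remove_raise_from(content):
--     lines = content.split("\n")
--     raise_flags = [" raise " in line for line in lines]
--     out = []
--     for i, line in enumerate(lines):
--         if " from " in line and any(raise_flags[max(0, i - 4):i + 1]):
--             spl = line.split(" from ")
--             if len(spl[0].strip(" \n")) > 0:
--                 line = spl[0] + "# from " + " - ".join(spl[1:])
--         out.append(line)
--     return "\n".join(out)
-- ===== Notes on version B (the rewrite author's own statement) =====
-- stated objective: alternative
-- what changed: Replaces A's rolling Option-index state machine (last raise-marker index with reset after 4 lines) by precomputing the list of raise-marker flags once and deciding each from-line from the sliding window flags[max(0,i-4):i+1].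
import Mathlib
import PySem

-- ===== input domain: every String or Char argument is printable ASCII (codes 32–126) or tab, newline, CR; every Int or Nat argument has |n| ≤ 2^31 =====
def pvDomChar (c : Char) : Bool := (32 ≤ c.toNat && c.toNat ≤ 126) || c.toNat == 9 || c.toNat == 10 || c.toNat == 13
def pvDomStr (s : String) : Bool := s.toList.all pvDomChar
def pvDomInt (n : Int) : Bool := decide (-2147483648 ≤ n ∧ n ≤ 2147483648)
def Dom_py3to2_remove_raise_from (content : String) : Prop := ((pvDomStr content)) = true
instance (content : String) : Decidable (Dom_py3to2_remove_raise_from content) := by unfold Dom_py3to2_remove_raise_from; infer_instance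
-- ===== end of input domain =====

-- B replaces A's rolling Option-state machine by a precomputed raise-flag list and a
-- sliding 5-line window consulted per line (objective: alternative decomposition, same cost).

-- ===== PORT A =====
-- A: single pass keeping r = index of the last raise-marker line, reset once i > r + 3.
def py3to2_remove_raise_from_go (r : Option Int) (i : Int) (ls : List (List Char)) : List (List Char) :=
  match ls with
  | [] => []
  | line :: rest =>
    let r1 : Option Int := if PySem.Chars.isIn " raise ".toList line then some i else r
    let line1 : List Char :=
      if PySem.Chars.isIn " from ".toList line && r1.isSome then
        let spl := PySem.Chars.splitOn line " from ".toList
        if 0 < (PySem.Chars.stripChars (spl.headD []) " \n".toList).length then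
          spl.headD [] ++ "# from ".toList ++ PySem.Chars.join " - ".toList (spl.drop 1)
        else line
      else line
    let r2 : Option Int :=
      match r1 with
      | some j => if i > j + 3 then none else some j
      | none => none
    line1 :: py3to2_remove_raise_from_go r2 (i + 1) rest

def py3to2_remove_raise_from (content : String) : String :=
  let lines := PySem.Chars.splitOn content.toList "\n".toList
  String.ofList (PySem.Chars.join "\n".toList (py3to2_remove_raise_from_go none 0 lines))

-- ===== PORT B =====
-- B: raise-marker flags precomputed once; each from-line consults the window flags[max(0,i-4) : i+1].
def py3to2_remove_raise_from_altLine (flags : List Bool) (p : Int × List Char) : List Char :=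
  if PySem.Chars.isIn " from ".toList p.2 &&
      (PySem.List.slice flags (some (max 0 (p.1 - 4))) (some (p.1 + 1))).any (fun b => b) then
    let spl := PySem.Chars.splitOn p.2 " from ".toList
    if 0 < (PySem.Chars.stripChars (spl.headD []) " \n".toList).length then
      spl.headD [] ++ "# from ".toList ++ PySem.Chars.join " - ".toList (spl.drop 1)
    else p.2
  else p.2

def py3to2_remove_raise_from_alt (content : String) : String :=
  let lines := PySem.Chars.splitOn content.toList "\n".toList
  let flags := lines.map (fun l => PySem.Chars.isIn " raise ".toList l)
  String.ofList (PySem.Chars.join "\n".toList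
    ((PySem.List.enumerate lines).map (py3to2_remove_raise_from_altLine flags)))

-- ===== PRECONDITION & SPEC =====
def Spec_py3to2_remove_raise_from (content : String) (out : String) : Prop := out = py3to2_remove_raise_from_alt content
instance (content : String) (out : String) : Decidable (Spec_py3to2_remove_raise_from content out) := by unfold Spec_py3to2_remove_raise_from; infer_instance

-- ===== CLAIM (what is proved, stated in full; the proofs are below) =====
def Claim_equal_py3to2_remove_raise_from : Prop := ∀ (content : String), Dom_py3to2_remove_raise_from content → Spec_py3to2_remove_raise_from content (py3to2_remove_raise_from content)

-- ===== LEMMAS AND PROOFS =====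

-- the common per-line rewrite (defeq to the inlined body of both ports)
def pvRw (line : List Char) : List Char :=
  let spl := PySem.Chars.splitOn line " from ".toList
  if 0 < (PySem.Chars.stripChars (spl.headD []) " \n".toList).length then
    spl.headD [] ++ "# from ".toList ++ PySem.Chars.join " - ".toList (spl.drop 1)
  else line

def pvFlag (line : List Char) : Bool := PySem.Chars.isIn " raise ".toList line
def pvFrom (line : List Char) : Bool := PySem.Chars.isIn " from ".toList line

-- pvW hist n: remaining "raise budget" encoded by the reversed history of raise flags
def pvW : List Bool → Nat → Nat
  | _, 0 => 0
  | [], _ + 1 => 0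
  | b :: h, n + 1 => if b then n + 1 else pvW h n

-- middle form: map with the reversed flag history carried along
def pvMapW (hist : List Bool) : List (List Char) → List (List Char)
  | [] => []
  | line :: rest =>
    (if pvFrom line && (pvFlag line || (hist.take 4).any (fun b => b)) then pvRw line else line)
      :: pvMapW (pvFlag line :: hist) rest

lemma pvW_pos (h : List Bool) : ∀ n : Nat, ((h.take n).any (fun b => b) = true) ↔ 0 < pvW h n := by
  induction h with
  | nil => intro n; cases n <;> simp [pvW]
  | cons b t ih =>
    intro n
    cases n with
    | zero => simp [pvW]
    | succ m => by_cases hb : b = true <;> simp [pvW, hb, ih m]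

lemma pvW_dec (h : List Bool) : ∀ n : Nat, pvW h n = pvW h (n + 1) - 1 := by
  induction h with
  | nil => intro n; cases n <;> simp [pvW]
  | cons b t ih =>
    intro n
    cases n with
    | zero => by_cases hb : b = true <;> simp [pvW, hb]
    | succ m => by_cases hb : b = true <;> simp [pvW, hb, ih m]

lemma go_eq_mapW : ∀ (ls : List (List Char)) (r : Option Int) (i : Int) (hist : List Bool),
    (match r with
     | none => pvW hist 4 = 0
     | some j => j < i ∧ i ≤ j + 4 ∧ (pvW hist 4 : Int) = 5 - (i - j)) →
    py3to2_remove_raise_from_go r i ls = pvMapW hist ls := by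
  intro ls
  induction ls with
  | nil => intro r i hist _; rfl
  | cons line rest ih =>
    intro r i hist hinv
    have hB : (if PySem.Chars.isIn " raise ".toList line then some i else r).isSome
        = (PySem.Chars.isIn " raise ".toList line || (hist.take 4).any (fun b => b)) := by
      cases hfl : PySem.Chars.isIn " raise ".toList line
      · simp only [Bool.false_eq_true, if_false, Bool.false_or]
        cases r with
        | none =>
          have h0 : pvW hist 4 = 0 := hinv
          rcases Bool.eq_false_or_eq_true ((hist.take 4).any (fun b => b)) with h | h
          · exact absurd ((pvW_pos hist 4).mp h) (by omega)
          · simp [h]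
        | some j =>
          obtain ⟨h1, h2, h3⟩ := hinv
          have : 0 < pvW hist 4 := by omega
          simp [(pvW_pos hist 4).mpr this]
      · simp
    simp only [py3to2_remove_raise_from_go, pvMapW, pvFrom, pvFlag, pvRw]
    rw [hB]
    refine congrArg₂ _ rfl ?_
    have hW3 : pvW hist 3 = pvW hist 4 - 1 := pvW_dec hist 3
    cases hfl : PySem.Chars.isIn " raise ".toList line
    · simp only [Bool.false_eq_true, if_false]
      cases r with
      | none =>
        have h0 : pvW hist 4 = 0 := hinv
        apply ih
        simp only [pvW, Bool.false_eq_true, if_false]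
        omega
      | some j =>
        obtain ⟨h1, h2, h3⟩ := hinv
        by_cases hr : i > j + 3
        · simp only [hr, if_true]
          apply ih
          simp only [pvW, Bool.false_eq_true, if_false]
          omega
        · simp only [hr, if_false]
          apply ih
          simp only [pvW, Bool.false_eq_true, if_false]
          refine ⟨by omega, by omega, by omega⟩
    · simp only [if_true]
      have : ¬ (i > i + 3) := by omega
      simp only [this, if_false]
      apply ih
      simp only [pvW, if_true]
      refine ⟨by omega, by omega, by omega⟩

lemma window_any (P R : List Bool) (f : Bool) :
    (PySem.List.slice (P ++ f :: R) (some (max 0 ((P.length : Int) - 4))) (some ((P.length : Int) + 1))).any (fun b => b)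
      = (f || (P.reverse.take 4).any (fun b => b)) := by
  have hmax : max (0 : Int) ((P.length : Int) - 4) = ((P.length - 4 : Nat) : Int) := by omega
  have hone : ((P.length : Int) + 1) = ((P.length + 1 : Nat) : Int) := by omega
  rw [hmax, hone, PySem.List.slice_natCast]
  have hdrop : (P ++ f :: R).drop (P.length - 4) = P.drop (P.length - 4) ++ f :: R := by
    rw [List.drop_append_of_le_length (by omega)]
  rw [hdrop]
  have hd : (P.drop (P.length - 4)).length = P.length - (P.length - 4) := List.length_drop
  have htk : List.take (P.length + 1 - (P.length - 4)) (P.drop (P.length - 4) ++ f :: R)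
      = P.drop (P.length - 4) ++ [f] := by
    rw [List.take_append, List.take_of_length_le (by omega)]
    have h1 : P.length + 1 - (P.length - 4) - (P.drop (P.length - 4)).length = 1 := by omega
    rw [h1]
    rfl
  have htr : P.reverse.take 4 = (P.drop (P.length - 4)).reverse := by
    rw [List.take_reverse]
  rw [htk, List.any_append, htr, List.any_reverse]
  cases f <;> simp

lemma mapW_eq_B : ∀ (ls : List (List Char)) (P : List Bool),
    pvMapW P.reverse ls =
      (PySem.List.enumerate ls ((P.length : Int))).map
        (py3to2_remove_raise_from_altLine (P ++ ls.map pvFlag)) := by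
  intro ls
  induction ls with
  | nil => intro P; simp [pvMapW, PySem.List.enumerate_nil]
  | cons line rest ih =>
    intro P
    rw [pvMapW, PySem.List.enumerate_cons, List.map_cons]
    refine congrArg₂ _ ?_ ?_
    · -- head line
      show _ = py3to2_remove_raise_from_altLine (P ++ pvFlag line :: rest.map pvFlag) ((P.length : Int), line)
      rw [py3to2_remove_raise_from_altLine]
      rw [window_any P (rest.map pvFlag) (pvFlag line)]
      simp only [pvFrom, pvFlag, pvRw]
    · -- tail
      have h := ih (P ++ [pvFlag line])
      rw [List.reverse_append] at h
      simp only [List.reverse_cons, List.reverse_nil, List.nil_append, List.singleton_append,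
        List.length_append, List.length_cons, List.length_nil] at h
      rw [h]
      simp [List.append_assoc]

-- ===== VERDICT (by name: the statement is the Claim_ definition above) =====
theorem py3to2_remove_raise_from_spec : Claim_equal_py3to2_remove_raise_from := by
  intro content _
  unfold Spec_py3to2_remove_raise_from
  simp only [py3to2_remove_raise_from, py3to2_remove_raise_from_alt]
  have h1 := go_eq_mapW (PySem.Chars.splitOn content.toList "\n".toList) none 0 [] (by simp [pvW])
  have h2 := mapW_eq_B (PySem.Chars.splitOn content.toList "\n".toList) []
  simp only [List.reverse_nil, List.length_nil, Int.natCast_zero, List.nil_append] at h2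
  rw [h1, h2]
  rfl
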